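-- pv_equiv track=rewrite | github.com/wengellen/cs36 | oddNumberBeforeZero.py | oddNumbersBeforeZero
-- ===== SOURCE A (Python) =====
-- def oddNumbersBeforeZero(sequence):
--
--     result = 0
--     for i in range(1, len(sequence)):
--         if sequence[i] == 0:
--             break
--         if sequence[i] % 2 == 1:
--             result += 1
--     return result
-- ===== SOURCE B (Python) =====
-- def oddNumbersBeforeZero(sequence):
--     tail = sequence[1:]
--     try:
--         end = tail.index(0)
--     except ValueError:
--         end = len(tail)
--     return sum(1 for x in tail[:end] if x % 2 == 1)
-- ===== Notes on version B (the rewrite author's own statement) =====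
-- stated objective: alternative
-- what changed: Replaces A's single fused index loop with early break by two separate passes: first locate the first zero in sequence[1:] via list.index, then count odds in the bounded slice with a sum over a generator.
import Mathlib
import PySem

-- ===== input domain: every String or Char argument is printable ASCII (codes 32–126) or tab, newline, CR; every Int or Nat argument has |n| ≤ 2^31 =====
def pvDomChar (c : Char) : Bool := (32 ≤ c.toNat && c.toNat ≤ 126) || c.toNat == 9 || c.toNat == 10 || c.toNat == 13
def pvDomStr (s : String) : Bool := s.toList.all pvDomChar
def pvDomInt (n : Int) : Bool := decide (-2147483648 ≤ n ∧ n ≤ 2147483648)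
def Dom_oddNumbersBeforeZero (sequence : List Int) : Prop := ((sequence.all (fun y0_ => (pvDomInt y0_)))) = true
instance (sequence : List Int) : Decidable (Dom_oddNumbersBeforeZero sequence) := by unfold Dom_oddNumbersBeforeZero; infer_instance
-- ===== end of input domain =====

-- B separates finding the first-zero boundary (list.index) from counting odds in the bounded prefix slice; alternative decomposition, same cost.


-- ===== PORT A =====
-- loop over indices i = 1 .. len-1 with early break at the first zero, fused with counting
def oddLoopA (seq : List Int) (i : Nat) (result : Int) : Int :=
  if h : i < seq.length then
    if seq[i] == 0 then result
    else oddLoopA seq (i + 1)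
      (if PySem.Int.mod seq[i] 2 == 1 then result + 1 else result)
  else result
termination_by seq.length - i

def oddNumbersBeforeZero (sequence : List Int) : Int :=
  oddLoopA sequence 1 0

-- ===== PORT B =====
def oddNumbersBeforeZero_alt (sequence : List Int) : Int :=
  let tail := sequence.drop 1                      -- sequence[1:]
  let e := (PySem.List.index? tail 0).getD tail.length   -- tail.index(0), or len(tail) on ValueError
  ((tail.take e).filter (fun x => PySem.Int.mod x 2 == 1)).length

-- ===== PRECONDITION & SPEC =====
def Spec_oddNumbersBeforeZero (sequence : List Int) (out : Int) : Prop := out = oddNumbersBeforeZero_alt sequence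
instance (sequence : List Int) (out : Int) : Decidable (Spec_oddNumbersBeforeZero sequence out) := by unfold Spec_oddNumbersBeforeZero; infer_instance

-- ===== CLAIM (what is proved, stated in full; the proofs are below) =====
def Claim_equal_oddNumbersBeforeZero : Prop := ∀ (sequence : List Int), Dom_oddNumbersBeforeZero sequence → Spec_oddNumbersBeforeZero sequence (oddNumbersBeforeZero sequence)

-- ===== LEMMAS AND PROOFS =====

-- reference function: odds until first zero, by structural recursion
def oddsUntilZero : List Int → Int
  | [] => 0
  | x :: xs => if x = 0 then 0
               else (if PySem.Int.mod x 2 = 1 then 1 else 0) + oddsUntilZero xs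

theorem oddLoopA_eq (seq : List Int) (n i : Nat) (r : Int) (hn : seq.length - i ≤ n) :
    oddLoopA seq i r = r + oddsUntilZero (seq.drop i) := by
  induction n generalizing i r with
  | zero =>
      rw [oddLoopA, dif_neg (by omega), List.drop_eq_nil_of_le (by omega), oddsUntilZero]
      ring
  | succ n ih =>
      rw [oddLoopA]
      by_cases h : i < seq.length
      · rw [dif_pos h, List.drop_eq_getElem_cons h, oddsUntilZero]
        by_cases hz : seq[i] = 0
        · simp [hz]
        · rw [if_neg (by simpa using hz), if_neg hz, ih (i + 1) _ (by omega)]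
          simp only [beq_iff_eq]
          split_ifs <;> ring
      · rw [dif_neg h, List.drop_eq_nil_of_le (by omega), oddsUntilZero]
        ring

theorem alt_eq (t : List Int) :
    (((t.take ((PySem.List.index? t 0).getD t.length)).filter
        (fun x => PySem.Int.mod x 2 == 1)).length : Int) = oddsUntilZero t := by
  induction t with
  | nil => simp [oddsUntilZero]
  | cons x xs ih =>
      by_cases hx : x = 0
      · subst hx
        rw [PySem.List.index?_cons_self]
        simp [oddsUntilZero]
      · rw [PySem.List.index?_cons_of_ne xs hx, oddsUntilZero, if_neg hx]
        have step : ∀ (k : Nat),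
            ((List.filter (fun x => PySem.Int.mod x 2 == 1) (List.take k xs)).length : Int)
              = oddsUntilZero xs →
            ((List.filter (fun x => PySem.Int.mod x 2 == 1)
                (List.take (k + 1) (x :: xs))).length : Int)
              = (if PySem.Int.mod x 2 = 1 then 1 else 0) + oddsUntilZero xs := by
          intro k hk
          rw [List.take_succ_cons, List.filter_cons, ← hk]
          by_cases hm : PySem.Int.mod x 2 = 1
          · rw [if_pos (by simpa using hm), if_pos hm, List.length_cons]
            push_cast; ring
          · rw [if_neg (by simpa using hm), if_neg hm]
            ring
        cases hidx : PySem.List.index? xs 0 with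
        | none =>
            rw [hidx] at ih
            simp only [Option.getD_none] at ih
            simp only [Option.map_none, Option.getD_none, List.length_cons]
            exact step xs.length ih
        | some k =>
            rw [hidx] at ih
            simp only [Option.getD_some] at ih
            simp only [Option.map_some, Option.getD_some]
            exact step k ih

-- ===== VERDICT (by name: the statement is the Claim_ definition above) =====
theorem oddNumbersBeforeZero_spec : Claim_equal_oddNumbersBeforeZero := by
  intro sequence _
  unfold Spec_oddNumbersBeforeZero oddNumbersBeforeZero oddNumbersBeforeZero_alt
  rw [oddLoopA_eq sequence sequence.length 1 0 (by omega), alt_eq]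
  ring
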